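-- pv_equiv track=rewrite | github.com/vargatn/xpipe | xpipe/xhandle/parbins.py | _bin_fnames
-- ===== SOURCE A (Python) =====
-- def _bin_fnames(qlist, fnames):
--     all_list = []
--     chunk = []
--     for i, qname in enumerate(qlist):
--         # print chunk
--         if i == 0 or qlist[i - 1] == qlist[i]:
--             chunk.append(fnames[i])
--         else:
--             all_list.append(chunk)
--             chunk = [fnames[i],]
--
--     all_list.append(chunk)
--
--     return all_list
-- ===== SOURCE B (Python) =====
-- def _bin_fnames(qlist, fnames):
--     n = len(qlist)
--     bounds = [0] + [i for i in range(1, n) if qlist[i] != qlist[i - 1]] + [n]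
--     return [fnames[a:b] for a, b in zip(bounds, bounds[1:])]
-- ===== Notes on version B (the rewrite author's own statement) =====
-- stated objective: alternative
-- what changed: B first computes the list of cut indices (where consecutive qlist values differ) in one pass and then emits the chunks by slicing fnames between consecutive bounds, instead of A's incremental accumulate-and-flush of a running chunk.
import Mathlib
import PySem

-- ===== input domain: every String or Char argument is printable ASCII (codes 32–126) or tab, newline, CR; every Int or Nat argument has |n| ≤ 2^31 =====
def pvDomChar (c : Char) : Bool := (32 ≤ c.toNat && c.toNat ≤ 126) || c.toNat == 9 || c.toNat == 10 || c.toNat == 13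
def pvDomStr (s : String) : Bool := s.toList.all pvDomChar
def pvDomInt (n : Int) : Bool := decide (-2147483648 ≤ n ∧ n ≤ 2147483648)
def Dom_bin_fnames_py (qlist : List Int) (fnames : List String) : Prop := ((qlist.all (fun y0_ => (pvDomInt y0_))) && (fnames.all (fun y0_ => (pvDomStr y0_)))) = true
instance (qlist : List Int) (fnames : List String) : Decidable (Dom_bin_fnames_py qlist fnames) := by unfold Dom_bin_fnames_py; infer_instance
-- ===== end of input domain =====

-- B computes the chunk boundaries first and then slices fnames between consecutive bounds,
-- instead of A's accumulate-and-flush loop (alternative decomposition, same return value).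


-- ===== PORT A =====
-- loop body of A's for-loop: state = (all_list, chunk); fnames[i] is pyGetD, exact under
-- Pre_ (Pre_ guarantees i < len fnames wherever the loop reads fnames[i])
def pvStepA (qlist : List Int) (fnames : List String)
    (st : List (List String) × List String) (p : Int × Int) :
    List (List String) × List String :=
  if p.1 = 0 ∨ PySem.List.pyGet? qlist (p.1 - 1) = PySem.List.pyGet? qlist p.1 then
    (st.1, st.2 ++ [PySem.List.pyGetD fnames p.1 ""])
  else
    (st.1 ++ [st.2], [PySem.List.pyGetD fnames p.1 ""])

def bin_fnames_py (qlist : List Int) (fnames : List String) : List (List String) :=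
  let st := (PySem.List.enumerate qlist 0).foldl (pvStepA qlist fnames) ([], [])
  st.1 ++ [st.2]

-- ===== PORT B =====
def bin_fnames_py_alt (qlist : List Int) (fnames : List String) : List (List String) :=
  let n : Int := PySem.List.len qlist
  let bounds : List Int :=
    [0] ++ (PySem.List.pyRange 1 n 1).filter
      (fun i => decide (¬ PySem.List.pyGet? qlist i = PySem.List.pyGet? qlist (i - 1))) ++ [n]
  (bounds.zip (PySem.List.slice bounds (some 1) none)).map
    (fun p => PySem.List.slice fnames (some p.1) (some p.2))

-- ===== PRECONDITION & SPEC =====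
-- Pre_ excludes exactly the inputs where A raises IndexError (fnames shorter than qlist)
def Pre_bin_fnames_py (qlist : List Int) (fnames : List String) : Prop :=
  qlist.length ≤ fnames.length
instance (qlist : List Int) (fnames : List String) : Decidable (Pre_bin_fnames_py qlist fnames) := by unfold Pre_bin_fnames_py; infer_instance
def pvWitness_bin_fnames_py : List Int × List String := ([0, 0, 1], ["a", "b", "c"])

def Spec_bin_fnames_py (qlist : List Int) (fnames : List String) (out : List (List String)) : Prop := out = bin_fnames_py_alt qlist fnames
instance (qlist : List Int) (fnames : List String) (out : List (List String)) : Decidable (Spec_bin_fnames_py qlist fnames out) := by unfold Spec_bin_fnames_py; infer_instance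

-- ===== CLAIM (what is proved, stated in full; the proofs are below) =====
def Claim_equal_bin_fnames_py : Prop := ∀ (qlist : List Int) (fnames : List String), Dom_bin_fnames_py qlist fnames → Pre_bin_fnames_py qlist fnames → Spec_bin_fnames_py qlist fnames (bin_fnames_py qlist fnames)


-- ===== LEMMAS AND PROOFS =====

-- common specification: group the (key, name) pairs into runs of equal keys
def pvGo (q : Int) (chunk : List String) : List (Int × String) → List (List String)
  | [] => [chunk]
  | (q', f) :: rest => if q' = q then pvGo q' (chunk ++ [f]) rest else chunk :: pvGo q' [f] rest

def pvGrp : List (Int × String) → List (List String)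
  | [] => [[]]
  | (q, f) :: rest => pvGo q [f] rest

def pvConsFirst (x : String) : List (List String) → List (List String)
  | [] => [[x]]
  | h :: t => (x :: h) :: t

lemma pvGo_cons_chunk (x : String) : ∀ (L : List (Int × String)) (q : Int) (chunk : List String),
    pvGo q (x :: chunk) L = pvConsFirst x (pvGo q chunk L) := by
  intro L
  induction L with
  | nil => intro q chunk; simp [pvGo, pvConsFirst]
  | cons p rest ih =>
    intro q chunk
    obtain ⟨q', f⟩ := p
    by_cases h : q' = q
    · subst h
      have e : ∀ c : List String, pvGo q' c ((q', f) :: rest) = pvGo q' (c ++ [f]) rest := by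
        intro c; simp [pvGo]
      rw [e, e, List.cons_append, ih]
    · simp [pvGo, h, pvConsFirst]

-- ---------- A-side: the fold equals pvGo ----------

lemma pvFoldA (qlist : List Int) (fnames : List String) (hlen : qlist.length ≤ fnames.length) :
    ∀ (suf pre : List Int) (prev : Int), qlist = pre ++ suf → 0 < pre.length →
      qlist[pre.length - 1]? = some prev →
      ∀ (all : List (List String)) (chunk : List String),
      ((PySem.List.enumerate suf (pre.length : Int)).foldl (pvStepA qlist fnames) (all, chunk)).1 ++
        [((PySem.List.enumerate suf (pre.length : Int)).foldl (pvStepA qlist fnames) (all, chunk)).2]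
      = all ++ pvGo prev chunk (suf.zip (fnames.drop pre.length)) := by
  intro suf
  induction suf with
  | nil =>
    intro pre prev hq hpre hprev all chunk
    simp [PySem.List.enumerate_nil, pvGo]
  | cons q s ih =>
    intro pre prev hq hpre hprev all chunk
    have hk0 : ¬ ((pre.length : Int) = 0) := by
      simp only [Int.natCast_eq_zero]; omega
    have hget1 : PySem.List.pyGet? qlist ((pre.length : Int)) = some q := by
      rw [hq]; exact PySem.List.pyGet?_append_length pre s q
    have hget0 : PySem.List.pyGet? qlist ((pre.length : Int) - 1) = some prev := by
      have hc : ((pre.length : Int) - 1) = ((pre.length - 1 : Nat) : Int) := by omega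
      rw [hc, PySem.List.pyGet?_natCast]; exact hprev
    have hflen : pre.length < fnames.length := by
      have : qlist.length = pre.length + (q :: s).length := by rw [hq]; simp
      simp at this; omega
    have hf : PySem.List.pyGetD fnames ((pre.length : Int)) "" = fnames[pre.length] := by
      rw [PySem.List.pyGetD_natCast]; exact List.getD_eq_getElem _ _ hflen
    have hdrop : fnames.drop pre.length = fnames[pre.length] :: fnames.drop (pre.length + 1) :=
      List.drop_eq_getElem_cons hflen
    have hq' : qlist = (pre ++ [q]) ++ s := by rw [hq]; simp
    have hprev' : qlist[(pre ++ [q]).length - 1]? = some q := by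
      have hl : (pre ++ [q]).length - 1 = pre.length := by simp
      rw [hl, ← PySem.List.pyGet?_natCast]; exact hget1
    have hstart : ((pre.length : Int) + 1) = (((pre ++ [q]).length : Nat) : Int) := by
      simp
    rw [PySem.List.enumerate_cons, List.foldl_cons]
    by_cases hpq : prev = q
    · have hcond : pvStepA qlist fnames (all, chunk) ((pre.length : Int), q)
          = (all, chunk ++ [fnames[pre.length]]) := by
        unfold pvStepA
        rw [if_pos (Or.inr (by rw [hget0, hget1, hpq]))]
        simp [hf]
      rw [hcond, hstart, ih (pre ++ [q]) q hq' (by simp) hprev' all (chunk ++ [fnames[pre.length]])]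
      rw [hdrop]
      simp only [List.length_append, List.length_cons, List.length_nil]
      rw [List.zip_cons_cons]
      simp [pvGo, hpq]
    · have hcond : pvStepA qlist fnames (all, chunk) ((pre.length : Int), q)
          = (all ++ [chunk], [fnames[pre.length]]) := by
        unfold pvStepA
        rw [if_neg]
        · simp [hf]
        · rw [hget0, hget1]
          intro h
          rcases h with h | h
          · exact hk0 h
          · exact hpq (Option.some.inj h)
      rw [hcond, hstart, ih (pre ++ [q]) q hq' (by simp) hprev' (all ++ [chunk]) [fnames[pre.length]]]
      rw [hdrop]
      simp only [List.length_append, List.length_cons, List.length_nil]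
      rw [List.zip_cons_cons]
      simp [pvGo, List.append_assoc]
      intro h; exact absurd h.symm hpq

lemma pvA_eq_grp (ql : List Int) (fn : List String) (hlen : ql.length ≤ fn.length) :
    bin_fnames_py ql fn = pvGrp (ql.zip fn) := by
  cases ql with
  | nil => simp [bin_fnames_py, PySem.List.enumerate_nil, pvGrp]
  | cons q s =>
    cases fn with
    | nil => simp at hlen
    | cons f fs =>
      unfold bin_fnames_py
      rw [PySem.List.enumerate_cons, List.foldl_cons]
      have hstep : pvStepA (q :: s) (f :: fs) ([], []) ((0 : Int), q) = ([], [f]) := by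
        unfold pvStepA
        rw [if_pos (Or.inl rfl)]
        simp [PySem.List.pyGetD_zero_cons]
      rw [hstep]
      have h1 : (0 : Int) + 1 = (([q].length : Nat) : Int) := by simp
      rw [h1, pvFoldA (q :: s) (f :: fs) (by simpa using hlen) s [q] q (by simp) (by simp) (by simp) [] [f]]
      simp [pvGrp]

-- ---------- B-side: the boundary/slice construction equals pvGrp ----------

def pvChanges (qlist : List Int) : List Int :=
  (PySem.List.pyRange 1 (PySem.List.len qlist) 1).filter
    (fun i => decide (¬ PySem.List.pyGet? qlist i = PySem.List.pyGet? qlist (i - 1)))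

lemma pvAlt_eq (ql : List Int) (fn : List String) :
    bin_fnames_py_alt ql fn =
      ((0 :: (pvChanges ql ++ [(ql.length : Int)])).zip (pvChanges ql ++ [(ql.length : Int)])).map
        (fun p => PySem.List.slice fn (some p.1) (some p.2)) := by
  simp only [bin_fnames_py_alt, pvChanges, PySem.List.slice_from_one, PySem.List.len_eq,
    List.tail_cons, List.cons_append, List.nil_append]

lemma pvChanges_nil : pvChanges [] = [] := by
  unfold pvChanges
  rw [PySem.List.pyRange_one_eq_nil (by simp [PySem.List.len_eq])]
  rfl

lemma pvChanges_single (q : Int) : pvChanges [q] = [] := by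
  unfold pvChanges
  rw [PySem.List.pyRange_one_eq_nil (by simp [PySem.List.len_eq])]
  rfl

lemma pvGet_cons_pos {a : Int} (x : Int) (xs : List Int) (h : 1 ≤ a) :
    PySem.List.pyGet? (x :: xs) a = PySem.List.pyGet? xs (a - 1) := by
  rw [PySem.List.pyGet?_of_nonneg (x :: xs) (show (0:Int) ≤ a by omega),
      PySem.List.pyGet?_of_nonneg xs (show (0:Int) ≤ a - 1 by omega)]
  have hn : a.toNat = (a - 1).toNat + 1 := by omega
  rw [hn, List.getElem?_cons_succ]

lemma pvChanges_cons (q r : Int) (t : List Int) :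
    pvChanges (q :: r :: t) = (if r = q then [] else [1]) ++ (pvChanges (r :: t)).map (· + 1) := by
  unfold pvChanges
  have hlen2 : PySem.List.len (q :: r :: t) = (t.length : Int) + 2 := by
    simp [PySem.List.len_eq]; ring
  have hlen1 : PySem.List.len (r :: t) = (t.length : Int) + 1 := by
    simp [PySem.List.len_eq]
  rw [hlen2, hlen1]
  rw [PySem.List.pyRange_one_cons (by omega)]
  have hrange : PySem.List.pyRange (1 + 1) ((t.length : Int) + 2) 1
      = (PySem.List.pyRange 1 ((t.length : Int) + 1) 1).map (· + 1) := by
    rw [PySem.List.pyRange_one, PySem.List.pyRange_one, List.map_map]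
    have h1 : (((t.length : Int) + 2) - (1 + 1)).toNat = (((t.length : Int) + 1) - 1).toNat := by omega
    rw [h1]
    apply List.map_congr_left
    intro k _
    simp [Function.comp]
    ring
  rw [List.filter_cons, hrange, List.filter_map]
  have hhead : (decide (¬ PySem.List.pyGet? (q :: r :: t) 1 = PySem.List.pyGet? (q :: r :: t) (1 - 1)) = true)
      = (¬ r = q) := by
    simp [pysem]
  have hpred : ∀ i ∈ PySem.List.pyRange 1 ((t.length : Int) + 1) 1,
      ((fun i => decide (¬ PySem.List.pyGet? (q :: r :: t) i = PySem.List.pyGet? (q :: r :: t) (i - 1))) ∘ (· + 1)) i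
      = (fun i => decide (¬ PySem.List.pyGet? (r :: t) i = PySem.List.pyGet? (r :: t) (i - 1))) i := by
    intro i hi
    have hib := (PySem.List.mem_pyRange_one).1 hi
    simp only [Function.comp]
    have e1 : PySem.List.pyGet? (q :: r :: t) (i + 1) = PySem.List.pyGet? (r :: t) i := by
      rw [pvGet_cons_pos q (r :: t) (by omega)]; norm_num
    have e2 : PySem.List.pyGet? (q :: r :: t) (i + 1 - 1) = PySem.List.pyGet? (r :: t) (i - 1) := by
      have : i + 1 - 1 = i := by ring
      rw [this, pvGet_cons_pos q (r :: t) (by omega)]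
    rw [e1, e2]
  rw [List.filter_congr hpred]
  by_cases hr : r = q
  · rw [if_pos hr]
    have : decide (¬ PySem.List.pyGet? (q :: r :: t) 1 = PySem.List.pyGet? (q :: r :: t) (1 - 1)) = false := by
      simp [pysem, hr]
    rw [this]
    simp
  · rw [if_neg hr]
    have : decide (¬ PySem.List.pyGet? (q :: r :: t) 1 = PySem.List.pyGet? (q :: r :: t) (1 - 1)) = true := by
      simp [pysem]
      exact fun h => absurd h hr
    rw [this]
    simp

lemma pvChanges_pos {b : Int} {ql : List Int} (h : b ∈ pvChanges ql) : 1 ≤ b := by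
  unfold pvChanges at h
  exact ((PySem.List.mem_pyRange_one).1 (List.mem_of_mem_filter h)).1

lemma pvSlice_cons_shift {α : Type} (x : α) (xs : List α) (a b : Int) (ha : 0 ≤ a) (hb : 0 ≤ b) :
    PySem.List.slice (x :: xs) (some (a + 1)) (some (b + 1)) = PySem.List.slice xs (some a) (some b) := by
  rw [PySem.List.slice_toNat (x :: xs) (by omega) (by omega), PySem.List.slice_toNat xs ha hb]
  have h1 : (a + 1).toNat = a.toNat + 1 := by omega
  have h2 : (b + 1).toNat = b.toNat + 1 := by omega
  rw [h1, h2, List.drop_succ_cons]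
  have h3 : b.toNat + 1 - (a.toNat + 1) = b.toNat - a.toNat := by omega
  rw [h3]

lemma pvSlice_zero_cons {α : Type} (x : α) (xs : List α) (b : Int) (hb : 0 ≤ b) :
    PySem.List.slice (x :: xs) (some 0) (some (b + 1)) = x :: PySem.List.slice xs (some 0) (some b) := by
  rw [PySem.List.slice_toNat (x :: xs) (by omega) (by omega), PySem.List.slice_toNat xs (by omega) hb]
  have h2 : (b + 1).toNat = b.toNat + 1 := by omega
  simp [h2]

lemma pvB_eq_grp : ∀ (ql : List Int) (fn : List String), ql.length ≤ fn.length →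
    bin_fnames_py_alt ql fn = pvGrp (ql.zip fn) := by
  intro ql
  induction ql with
  | nil =>
    intro fn _
    rw [pvAlt_eq, pvChanges_nil]
    simp [pvGrp, PySem.List.slice_toNat]
  | cons q rest ih =>
    intro fn hlen
    cases fn with
    | nil => simp at hlen
    | cons f fs =>
      cases rest with
      | nil =>
        rw [pvAlt_eq, pvChanges_single]
        have h1 : (([q] : List Int).length : Int) = 1 := by simp
        rw [h1]
        show [PySem.List.slice (f :: fs) (some 0) (some 1)] = pvGrp ([q].zip (f :: fs))
        rw [PySem.List.slice_toNat _ (by omega) (by omega)]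
        rfl
      | cons r t =>
        have hfs : t.length + 1 ≤ fs.length := by simp at hlen; omega
        obtain ⟨f1, fs', rfl⟩ : ∃ f1 fs', fs = f1 :: fs' := by
          cases fs with
          | nil => simp at hfs
          | cons a b => exact ⟨a, b, rfl⟩
        rw [pvAlt_eq, pvChanges_cons]
        -- the bounds tail of the shorter problem
        set T : List Int := pvChanges (r :: t) ++ [((r :: t).length : Int)] with hT
        have hTpos : ∀ b ∈ T, 0 ≤ b := by
          intro b hb
          rcases List.mem_append.1 hb with hb | hb
          · have := pvChanges_pos hb; omega
          · simp at hb; omega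
        obtain ⟨t0, T', hT'⟩ : ∃ t0 T', T = t0 :: T' := by
          cases hc : pvChanges (r :: t) with
          | nil => exact ⟨_, _, by rw [hT, hc]; rfl⟩
          | cons a b => exact ⟨_, _, by rw [hT, hc]; rfl⟩
        have hlen' : ((q :: r :: t).length : Int) = ((r :: t).length : Int) + 1 := by
          simp [List.length_cons]
        have hmapT : (pvChanges (r :: t)).map (· + 1) ++ [((q :: r :: t).length : Int)]
            = T.map (· + 1) := by
          rw [hT, List.map_append, hlen']
          rfl
        have hIH : bin_fnames_py_alt (r :: t) (f1 :: fs')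
            = pvGrp ((r :: t).zip (f1 :: fs')) := ih (f1 :: fs') (by simpa using hfs)
        have hIHexp : PySem.List.slice (f1 :: fs') (some 0) (some t0) ::
              ((t0 :: T').zip T').map (fun p => PySem.List.slice (f1 :: fs') (some p.1) (some p.2))
            = pvGrp ((r :: t).zip (f1 :: fs')) := by
          rw [← hIH, pvAlt_eq, ← hT, hT', List.zip_cons_cons, List.map_cons]
        have hshift : ∀ (L : List (Int × Int)), (∀ p ∈ L, 0 ≤ p.1 ∧ 0 ≤ p.2) →
            (L.map (fun p => ((p.1 + 1 : Int), (p.2 + 1 : Int)))).map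
                (fun p => PySem.List.slice (f :: f1 :: fs') (some p.1) (some p.2))
              = L.map (fun p => PySem.List.slice (f1 :: fs') (some p.1) (some p.2)) := by
          intro L hL
          rw [List.map_map]
          apply List.map_congr_left
          intro p hp
          obtain ⟨h1, h2⟩ := hL p hp
          simp only [Function.comp]
          exact pvSlice_cons_shift f (f1 :: fs') p.1 p.2 h1 h2
        have hzipT : ∀ p ∈ (t0 :: T').zip T', 0 ≤ p.1 ∧ 0 ≤ p.2 := by
          intro p hp
          have h1 := List.of_mem_zip hp
          constructor
          · exact hTpos p.1 (by rw [hT']; exact h1.1)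
          · exact hTpos p.2 (by rw [hT']; exact List.mem_cons_of_mem t0 h1.2)
        by_cases hr : r = q
        · -- no cut after the first element: first chunk of the sub-result grows by f
          rw [if_pos hr]
          rw [List.nil_append, hmapT, hT']
          rw [List.map_cons, List.zip_cons_cons, List.map_cons]
          have htail : (((t0 + 1) :: T'.map (· + 1)).zip (T'.map (· + 1)))
              = ((t0 :: T').zip T').map (fun p => ((p.1 + 1 : Int), (p.2 + 1 : Int))) := by
            have h := @List.zip_map Int Int Int Int (· + (1 : Int)) (· + (1 : Int)) (t0 :: T') T'
            simp only [List.map_cons] at h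
            rw [h]
            simp [Prod.map]
          rw [htail, hshift _ hzipT]
          have ht0 : (0 : Int) ≤ t0 := hTpos t0 (by rw [hT']; exact List.mem_cons_self)
          rw [pvSlice_zero_cons f (f1 :: fs') t0 ht0]
          have hG : pvGrp ((q :: r :: t).zip (f :: f1 :: fs'))
              = pvConsFirst f (pvGrp ((r :: t).zip (f1 :: fs'))) := by
            show pvGo q [f] ((r, f1) :: t.zip fs') = pvConsFirst f (pvGo r [f1] (t.zip fs'))
            rw [show pvGo q [f] ((r, f1) :: t.zip fs') = pvGo r ([f] ++ [f1]) (t.zip fs') from by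
              simp [pvGo, hr]]
            exact pvGo_cons_chunk f (t.zip fs') r [f1]
          rw [hG, ← hIHexp]
          rfl
        · -- a cut right after the first element: [f] becomes its own chunk
          rw [if_neg hr]
          have hbounds : ((1 : Int) :: ((pvChanges (r :: t)).map (· + 1) ++ [((q :: r :: t).length : Int)]))
              = (0 :: T).map (· + 1) := by
            rw [List.map_cons, ← hmapT]
            norm_num
          rw [show ([1] ++ (pvChanges (r :: t)).map (· + 1) : List Int)
                = 1 :: (pvChanges (r :: t)).map (· + 1) from rfl]
          rw [List.cons_append, hbounds]
          rw [hT', List.map_cons, List.map_cons, List.zip_cons_cons, List.map_cons]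
          have htail : (((0 + 1) :: (t0 + 1) :: T'.map (· + 1)).zip ((t0 + 1) :: T'.map (· + 1)))
              = ((0 :: t0 :: T').zip (t0 :: T')).map (fun p => ((p.1 + 1 : Int), (p.2 + 1 : Int))) := by
            have h := @List.zip_map Int Int Int Int (· + (1 : Int)) (· + (1 : Int)) (0 :: t0 :: T') (t0 :: T')
            simp only [List.map_cons] at h
            rw [h]
            simp [Prod.map]
          rw [htail, hshift _ ?hz]
          case hz =>
            intro p hp
            have h1 := List.of_mem_zip hp
            have hp1 : p.1 ∈ (0 : Int) :: T := by rw [hT']; exact h1.1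
            have hp2 : p.2 ∈ T := by rw [hT']; exact h1.2
            rcases List.mem_cons.1 hp1 with h | h
            · exact ⟨by omega, hTpos p.2 hp2⟩
            · exact ⟨hTpos p.1 h, hTpos p.2 hp2⟩
          have hhead : PySem.List.slice (f :: f1 :: fs') (some 0) (some (0 + 1)) = [f] := by
            rw [pvSlice_zero_cons f (f1 :: fs') 0 le_rfl]
            rw [PySem.List.slice_toNat _ (by omega) (by omega)]
            simp
          rw [hhead]
          have hrest : ((0 :: t0 :: T').zip (t0 :: T')).map
                (fun p => PySem.List.slice (f1 :: fs') (some p.1) (some p.2))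
              = pvGrp ((r :: t).zip (f1 :: fs')) := by
            rw [← hIH, pvAlt_eq, ← hT, hT', List.zip_cons_cons]
          rw [hrest]
          show [f] :: pvGrp ((r :: t).zip (f1 :: fs')) = pvGo q [f] ((r, f1) :: t.zip fs')
          simp [pvGo, hr, pvGrp]

-- ===== VERDICT (by name: the statement is the Claim_ definition above) =====
theorem bin_fnames_py_spec : Claim_equal_bin_fnames_py := by
  intro qlist fnames _ hpre
  unfold Spec_bin_fnames_py
  rw [pvA_eq_grp qlist fnames hpre, pvB_eq_grp qlist fnames hpre]
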